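-- pv_equiv track=rewrite | github.com/SaveWatt/NAUEnergyDashboard | edashboard/edashboard/clean.py | getBuildInfo
-- ===== SOURCE A (Python) =====
-- def getBuildInfo(str):
--     starr = str.split(" ")
--     bnum = starr[len(starr)-1]
--     bnum = bnum.replace("(","")
--     bnum = bnum.replace(")","")
--     bname = ""
--     for i in range(0,len(starr)-1):
--         bname += starr[i]
--     return [bname,bnum]
-- ===== SOURCE B (Python) =====
-- def getBuildInfo(str):
--     head, _, tail = str.rpartition(" ")
--     return [head.replace(" ", ""), tail.replace("(", "").replace(")", "")]
-- ===== Notes on version B (the rewrite author's own statement) =====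
-- stated objective: simpler
-- what changed: B splits once at the last space with rpartition and cleans the two halves with replace, instead of building the full token list with split and concatenating all but the last token in an index loop.
import Mathlib
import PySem

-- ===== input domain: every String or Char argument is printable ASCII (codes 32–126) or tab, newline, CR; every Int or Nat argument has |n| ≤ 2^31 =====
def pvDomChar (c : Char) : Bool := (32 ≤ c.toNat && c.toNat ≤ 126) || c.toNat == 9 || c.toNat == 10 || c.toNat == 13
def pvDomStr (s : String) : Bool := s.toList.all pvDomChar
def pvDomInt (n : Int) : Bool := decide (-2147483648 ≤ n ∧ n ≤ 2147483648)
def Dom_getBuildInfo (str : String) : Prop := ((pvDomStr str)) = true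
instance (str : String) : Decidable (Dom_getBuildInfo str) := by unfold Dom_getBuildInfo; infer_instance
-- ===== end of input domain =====

-- B parses by one rpartition at the last space instead of A's split + index loop; objective: simpler.

-- ===== PORT A =====
def getBuildInfo (str : String) : List String :=
  let starr := PySem.Chars.splitOn str.toList [' ']
  -- starr[len(starr)-1]: split always returns a nonempty list, so the lookup never raises
  let bnum := (PySem.List.pyGet? starr ((starr.length : Int) - 1)).getD []
  let bnum := PySem.Chars.replace bnum ['('] []
  let bnum := PySem.Chars.replace bnum [')'] []
  let bname := (PySem.List.pyRange 0 ((starr.length : Int) - 1) 1).foldl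
      (fun acc j => acc ++ PySem.List.pyGetD starr j []) []
  [String.ofList bname, String.ofList bnum]

-- ===== PORT B =====
-- str.rpartition(" "): split at the last occurrence, '' head when absent (via rfind + slices)
def getBuildInfo_alt (str : String) : List String :=
  let cs := str.toList
  let i := PySem.Chars.rfind cs [' ']
  let head := if i = -1 then [] else PySem.List.slice cs none (some i)
  let tail := if i = -1 then cs else PySem.List.slice cs (some (i + 1)) none
  [String.ofList (PySem.Chars.replace head [' '] []),
   String.ofList (PySem.Chars.replace (PySem.Chars.replace tail ['('] []) [')'] [])]

-- ===== PRECONDITION & SPEC =====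
def Spec_getBuildInfo (str : String) (out : List String) : Prop := out = getBuildInfo_alt str
instance (str : String) (out : List String) : Decidable (Spec_getBuildInfo str out) := by unfold Spec_getBuildInfo; infer_instance

-- ===== CLAIM (what is proved, stated in full; the proofs are below) =====
def Claim_equal_getBuildInfo : Prop := ∀ (str : String), Dom_getBuildInfo str → Spec_getBuildInfo str (getBuildInfo str)

-- ===== LEMMAS AND PROOFS =====

-- canonical single-char split, used to characterise both programs
def pvSplit (c : Char) : List Char → List (List Char)
  | [] => [[]]
  | x :: xs =>
    if x = c then [] :: pvSplit c xs
    else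
      match pvSplit c xs with
      | [] => [[x]]
      | t :: ts => (x :: t) :: ts

theorem pvSplit_ne_nil (c : Char) (l : List Char) : pvSplit c l ≠ [] := by
  cases l with
  | nil => simp [pvSplit]
  | cons x xs =>
    simp only [pvSplit]
    split
    · simp
    · split <;> simp

theorem isPrefixOf_single (c x : Char) (l : List Char) :
    ([c].isPrefixOf (x :: l)) = (c == x) := by
  simp [List.isPrefixOf]

theorem replace_single_empty (c : Char) (s : List Char) :
    PySem.Chars.replace s [c] [] = s.filter (· ≠ c) := by
  have go : ∀ fuel (l acc : List Char), l.length ≤ fuel →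
      PySem.Chars.replace.go [c] [] fuel l acc = acc.reverse ++ l.filter (· ≠ c) := by
    intro fuel
    induction fuel with
    | zero =>
      intro l acc h
      have : l = [] := List.length_eq_zero_iff.mp (Nat.le_zero.mp h)
      subst this; simp [PySem.Chars.replace.go]
    | succ n ih =>
      intro l acc h
      cases l with
      | nil => simp [PySem.Chars.replace.go]
      | cons x rest =>
        simp only [PySem.Chars.replace.go]
        by_cases hx : x = c
        · have hpre : [c].isPrefixOf (x :: rest) = true := by
            rw [isPrefixOf_single]; simp [hx]
          rw [hpre, if_pos rfl]
          rw [show List.drop [c].length (x :: rest) = rest by simp]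
          rw [List.length_cons] at h
          simp only [List.reverse_nil, List.nil_append]
          rw [ih rest acc (Nat.le_of_succ_le_succ h)]
          simp [hx]
        · have hpre : [c].isPrefixOf (x :: rest) = false := by
            simp [isPrefixOf_single]
            exact fun hc => hx hc.symm
          rw [hpre]
          simp only [Bool.false_eq_true, if_false]
          rw [ih rest (x :: acc) (by simpa using Nat.le_of_succ_le_succ h)]
          simp [hx]
  simp only [PySem.Chars.replace]
  rw [if_neg (by simp)]
  simpa using go s.length s [] le_rfl

theorem splitOn_eq_pvSplit (c : Char) (s : List Char) :
    PySem.Chars.splitOn s [c] = pvSplit c s := by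
  have go : ∀ fuel (l cur : List Char) (acc : List (List Char)), l.length < fuel →
      PySem.Chars.splitOn.go [c] fuel l cur acc =
        acc.reverse ++ (pvSplit c l).modifyHead (fun t => cur.reverse ++ t) := by
    intro fuel
    induction fuel with
    | zero => intro l cur acc h; omega
    | succ n ih =>
      intro l cur acc h
      cases l with
      | nil => simp [PySem.Chars.splitOn.go, pvSplit]
      | cons x rest =>
        simp only [PySem.Chars.splitOn.go]
        by_cases hx : x = c
        · have hpre : [c].isPrefixOf (x :: rest) = true := by
            rw [isPrefixOf_single]; simp [hx]
          rw [hpre, if_pos rfl]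
          rw [show List.drop [c].length (x :: rest) = rest by simp]
          rw [ih rest [] (cur.reverse :: acc) (by simp at h ⊢; omega)]
          simp [pvSplit, hx]
          cases h' : pvSplit c rest <;> simp [List.modifyHead]
        · have hpre : [c].isPrefixOf (x :: rest) = false := by
            simp [isPrefixOf_single]
            exact fun hc => hx hc.symm
          rw [hpre]
          simp only [Bool.false_eq_true, if_false]
          rw [ih rest (x :: cur) acc (by simp at h ⊢; omega)]
          obtain ⟨t, ts, hts⟩ := List.exists_cons_of_ne_nil (pvSplit_ne_nil c rest)
          simp [pvSplit, hx, hts]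
  simp only [PySem.Chars.splitOn]
  rw [go (s.length + 1) s [] [] (by omega)]
  obtain ⟨t, ts, hts⟩ := List.exists_cons_of_ne_nil (pvSplit_ne_nil c s)
  simp [hts]

theorem pvSplit_append (c : Char) (u v : List Char) :
    pvSplit c (u ++ c :: v) = pvSplit c u ++ pvSplit c v := by
  induction u with
  | nil => simp [pvSplit]
  | cons x u' ih =>
    by_cases hx : x = c
    · subst hx; simp [pvSplit, ih]
    · obtain ⟨t, ts, hts⟩ := List.exists_cons_of_ne_nil (pvSplit_ne_nil c u')
      simp [pvSplit, hx, ih, hts]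

theorem pvSplit_of_not_mem (c : Char) (v : List Char) (h : c ∉ v) : pvSplit c v = [v] := by
  induction v with
  | nil => simp [pvSplit]
  | cons x xs ih =>
    simp only [List.mem_cons, not_or] at h
    have hx : x ≠ c := fun hc => h.1 hc.symm
    simp [pvSplit, hx, ih h.2]

theorem pvSplit_flatten (c : Char) (u : List Char) :
    (pvSplit c u).flatten = u.filter (· ≠ c) := by
  induction u with
  | nil => simp [pvSplit]
  | cons x xs ih =>
    by_cases hx : x = c
    · subst hx; simp [pvSplit, ih]
    · obtain ⟨t, ts, hts⟩ := List.exists_cons_of_ne_nil (pvSplit_ne_nil c xs)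
      rw [hts] at ih
      simp [pvSplit, hx, hts]
      simpa using ih

theorem rfind_of_not_mem (c : Char) (s : List Char) (h : c ∉ s) :
    PySem.Chars.rfind s [c] = -1 := by
  have go : ∀ n, n ≤ s.length → PySem.Chars.rfind.go s [c] n = -1 := by
    intro n
    induction n with
    | zero =>
      intro _
      simp only [PySem.Chars.rfind.go]
      cases s with
      | nil => simp
      | cons x xs =>
        simp only [List.mem_cons, not_or] at h
        have : [c].isPrefixOf (x :: xs) = false := by
          simp [isPrefixOf_single]
          exact fun hc => h.1 hc
        simp [this]
    | succ j ih =>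
      intro hn
      simp only [PySem.Chars.rfind.go]
      have : [c].isPrefixOf (List.drop (j + 1) s) = false := by
        cases hd : List.drop (j + 1) s with
        | nil => simp
        | cons y ys =>
          have hy : y ∈ s := by
            have : y ∈ List.drop (j + 1) s := by rw [hd]; exact List.mem_cons_self
            exact List.mem_of_mem_drop this
          simp [isPrefixOf_single]
          exact fun hc => h (hc ▸ hy)
      simp only [this, Bool.false_eq_true, if_false]
      exact ih (by omega)
  simpa [PySem.Chars.rfind] using go s.length le_rfl

theorem rfind_last (c : Char) (u v : List Char) (h : c ∉ v) :
    PySem.Chars.rfind (u ++ c :: v) [c] = u.length := by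
  set s := u ++ c :: v with hs
  have hlen : s.length = u.length + v.length + 1 := by simp [hs]; omega
  have go : ∀ n, u.length ≤ n → n ≤ s.length → PySem.Chars.rfind.go s [c] n = u.length := by
    intro n
    induction n with
    | zero =>
      intro h1 _
      have hu : u = [] := List.length_eq_zero_iff.mp (Nat.le_zero.mp h1)
      subst hu
      simp [PySem.Chars.rfind.go, hs, List.isPrefixOf]
    | succ j ih =>
      intro h1 h2
      simp only [PySem.Chars.rfind.go]
      by_cases heq : j + 1 = u.length
      · have hd : List.drop (j + 1) s = c :: v := by
          rw [heq, hs, List.drop_append_of_le_length le_rfl]; simp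
        rw [hd]
        simp [List.isPrefixOf, heq]
      · have hgt : u.length < j + 1 := by omega
        have hpre : [c].isPrefixOf (List.drop (j + 1) s) = false := by
          have hd : List.drop (j + 1) s = List.drop (j - u.length) v := by
            rw [hs, List.drop_append, List.drop_eq_nil_of_le (by omega)]
            have h3 : j + 1 - u.length = (j - u.length) + 1 := by omega
            simp [h3, List.drop_succ_cons]
          cases hv : List.drop (j - u.length) v with
          | nil => simp [hd, hv]
          | cons y ys =>
            have hy : y ∈ v := by
              have : y ∈ List.drop (j - u.length) v := by rw [hv]; exact List.mem_cons_self
              exact List.mem_of_mem_drop this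
            rw [hd, hv]
            simp [isPrefixOf_single]
            exact fun hc => h (hc ▸ hy)
        simp only [hpre, Bool.false_eq_true, if_false]
        exact ih (by omega) (by omega)
  simpa [PySem.Chars.rfind] using go s.length (by omega) le_rfl

theorem exists_last_occ (c : Char) (s : List Char) (h : c ∈ s) :
    ∃ u v, s = u ++ c :: v ∧ c ∉ v := by
  induction s with
  | nil => cases h
  | cons x xs ih =>
    by_cases hm : c ∈ xs
    · obtain ⟨u, v, huv, hv⟩ := ih hm
      exact ⟨x :: u, v, by simp [huv], hv⟩
    · have hx : x = c := by
        rcases List.mem_cons.mp h with h1 | h2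
        · exact h1.symm
        · exact absurd h2 hm
      exact ⟨[], xs, by simp [hx], hm⟩

theorem foldl_cat (ts : List (List Char)) (w : List Char) :
    (PySem.List.pyRange 0 (ts.length : Int) 1).foldl
      (fun acc j => acc ++ PySem.List.pyGetD (ts ++ [w]) j []) [] = ts.flatten := by
  suffices hgen : ∀ (acc : List Char),
      (PySem.List.pyRange 0 (ts.length : Int) 1).foldl
        (fun acc j => acc ++ PySem.List.pyGetD (ts ++ [w]) j []) acc = acc ++ ts.flatten by
    simpa using hgen []
  induction ts using List.reverseRecOn with
  | nil => intro acc; simp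
  | append_singleton ts t ih =>
    intro acc
    rw [show ((((ts ++ [t]).length : Nat)) : Int) = (ts.length : Int) + 1 by
      norm_num [List.length_append]]
    rw [PySem.List.pyRange_one_succ_right (by positivity), List.foldl_append]
    have hstep : ∀ (xs : List (List Char)) (a : List Char),
        (PySem.List.pyRange 0 (ts.length : Int) 1).foldl
          (fun acc j => acc ++ PySem.List.pyGetD ((ts ++ [t]) ++ [w]) j []) a =
        (PySem.List.pyRange 0 (ts.length : Int) 1).foldl
          (fun acc j => acc ++ PySem.List.pyGetD (ts ++ xs) j []) a := by
      intro xs a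
      apply PySem.List.foldl_congr_mem
      intro b j hj
      have hj' := (PySem.List.mem_pyRange_one).mp hj
      have h0 : 0 ≤ j := hj'.1
      have hlt : j < (ts.length : Int) := hj'.2
      rw [PySem.List.pyGetD_of_nonneg _ _ h0, PySem.List.pyGetD_of_nonneg _ _ h0]
      congr 1
      rw [List.append_assoc]
      rw [List.getD_eq_getElem?_getD, List.getD_eq_getElem?_getD,
        List.getElem?_append_left (by omega), List.getElem?_append_left (by omega)]
    rw [hstep [w] acc, ih]
    simp only [List.foldl_cons, List.foldl_nil]
    have hget : PySem.List.pyGetD ((ts ++ [t]) ++ [w]) (ts.length : Int) [] = t := by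
      rw [PySem.List.pyGetD_of_nonneg _ _ (by positivity : (0:Int) ≤ (ts.length : Int))]
      rw [List.append_assoc]
      simp [List.getD]
    rw [hget]
    simp

-- the two programs agree on every string
theorem getBuildInfo_eq_alt (str : String) : getBuildInfo str = getBuildInfo_alt str := by
  simp only [getBuildInfo, getBuildInfo_alt]
  set cs := str.toList with hcs
  by_cases hmem : ' ' ∈ cs
  · obtain ⟨u, v, huv, hv⟩ := exists_last_occ ' ' cs hmem
    have hrf : PySem.Chars.rfind cs [' '] = u.length := by rw [huv]; exact rfind_last _ _ _ hv
    have hne : (u.length : Int) ≠ -1 := by omega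
    have hsplit : PySem.Chars.splitOn cs [' '] = pvSplit ' ' u ++ [v] := by
      rw [huv, splitOn_eq_pvSplit, pvSplit_append, pvSplit_of_not_mem _ _ hv]
    obtain ⟨t, ts, hts⟩ := List.exists_cons_of_ne_nil (pvSplit_ne_nil ' ' u)
    have hlast : (PySem.List.pyGet? (pvSplit ' ' u ++ [v])
        ((((pvSplit ' ' u ++ [v]).length : Int)) - 1)).getD [] = v := by
      rw [List.length_append]
      have : (((pvSplit ' ' u).length + [v].length : Nat) : Int) - 1 = ((pvSplit ' ' u).length : Int) := by
        simp
      rw [this, PySem.List.pyGet?_natCast]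
      simp
    have hfold : (PySem.List.pyRange 0 (((pvSplit ' ' u ++ [v]).length : Int) - 1) 1).foldl
        (fun acc j => acc ++ PySem.List.pyGetD (pvSplit ' ' u ++ [v]) j []) [] =
        (pvSplit ' ' u).flatten := by
      have : (((pvSplit ' ' u ++ [v]).length : Int)) - 1 = ((pvSplit ' ' u).length : Int) := by
        simp
      rw [this]
      exact foldl_cat _ _
    rw [hsplit, hrf, hlast, hfold, if_neg hne, if_neg hne]
    have hslice1 : PySem.List.slice cs none (some (u.length : Int)) = u := by
      rw [PySem.List.slice_to _ (by positivity)]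
      rw [huv]; simp
    have hslice2 : PySem.List.slice cs (some ((u.length : Int) + 1)) none = v := by
      rw [PySem.List.slice_from _ (by positivity)]
      rw [huv]
      have : ((u.length : Int) + 1).toNat = u.length + 1 := by omega
      rw [this]
      simp [List.drop_append, List.drop_eq_nil_of_le]
    rw [hslice1, hslice2]
    simp only [replace_single_empty, pvSplit_flatten]
  · have hrf : PySem.Chars.rfind cs [' '] = -1 := rfind_of_not_mem _ _ hmem
    have hsplit : PySem.Chars.splitOn cs [' '] = [cs] := by
      rw [splitOn_eq_pvSplit, pvSplit_of_not_mem _ _ hmem]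
    rw [hsplit, hrf]
    simp [PySem.List.pyGet?, PySem.List.pyIdx?, replace_single_empty]

-- ===== VERDICT (by name: the statement is the Claim_ definition above) =====
theorem getBuildInfo_spec : Claim_equal_getBuildInfo := by
  intro str _
  unfold Spec_getBuildInfo
  exact getBuildInfo_eq_alt str
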